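-- pv_equiv track=rewrite | github.com/Amitanand0123/major_project | detector/swebench_integration.py | extract_compilation_errors
-- ===== SOURCE A (Python) =====
-- from typing import Dict, List, Any, Optional
--
-- def extract_compilation_errors(step: Dict) -> List[str]:
--     """
--     Extract compilation/syntax errors from step observation
--
--     Args:
--         step: Step dictionary
--
--     Returns:
--         List of error messages
--     """
--     observation = step.get('observation', '')
--     errors = []
--
--     # Common error patterns
--     error_patterns = [
--         'SyntaxError',
--         'IndentationError',
--         'ImportError',
--         'ModuleNotFoundError',
--         'NameError',
--         'AttributeError',
--         'TypeError',
--         'ValueError',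
--     ]
--
--     for pattern in error_patterns:
--         if pattern in observation:
--             # Extract the error line
--             lines = observation.split('\n')
--             for i, line in enumerate(lines):
--                 if pattern in line:
--                     # Get error line and surrounding context
--                     context_start = max(0, i - 1)
--                     context_end = min(len(lines), i + 3)
--                     error_context = '\n'.join(lines[context_start:context_end])
--                     errors.append(error_context)
--                     break
--
--     return errors
-- ===== SOURCE B (Python) =====
-- def extract_compilation_errors(step):
--     """Same result as A: one index-building pass over the lines, then emit in pattern order."""
--     observation = step.get('observation', '')
--     error_patterns = [
--         'SyntaxError',
--         'IndentationError',
--         'ImportError',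
--         'ModuleNotFoundError',
--         'NameError',
--         'AttributeError',
--         'TypeError',
--         'ValueError',
--     ]
--     lines = observation.split('\n')
--     first_idx = {}
--     for i, line in enumerate(lines):
--         for pattern in error_patterns:
--             if pattern not in first_idx and pattern in line:
--                 first_idx[pattern] = i
--     errors = []
--     for pattern in error_patterns:
--         if pattern in first_idx:
--             i = first_idx[pattern]
--             errors.append('\n'.join(lines[max(0, i - 1):min(len(lines), i + 3)]))
--     return errors
-- ===== Notes on version B (the rewrite author's own statement) =====
-- stated objective: alternative
-- what changed: Replaces A's per-pattern whole-text test plus per-pattern rescans of the split lines by splitting once and making a single enumerated pass over the lines that records each pattern's first matching line index in a dict, then emitting the contexts in the fixed pattern order.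
import Mathlib
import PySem

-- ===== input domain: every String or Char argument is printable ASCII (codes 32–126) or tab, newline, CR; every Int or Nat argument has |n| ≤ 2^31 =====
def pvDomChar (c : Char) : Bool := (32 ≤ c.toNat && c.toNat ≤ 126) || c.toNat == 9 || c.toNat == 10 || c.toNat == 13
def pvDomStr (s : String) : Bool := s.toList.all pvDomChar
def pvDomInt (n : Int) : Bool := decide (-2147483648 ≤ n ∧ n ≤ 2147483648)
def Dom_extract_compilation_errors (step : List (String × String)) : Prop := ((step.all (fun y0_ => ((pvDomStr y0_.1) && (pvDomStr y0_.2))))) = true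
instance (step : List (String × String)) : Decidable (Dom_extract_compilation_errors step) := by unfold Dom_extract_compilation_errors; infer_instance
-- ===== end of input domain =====

-- B restructures A (index-building pass + emit pass) with the same result; objective: alternative decomposition.

-- the fixed pattern list both Pythons hard-code
def pvErrorPatterns : List String :=
  ["SyntaxError", "IndentationError", "ImportError", "ModuleNotFoundError",
   "NameError", "AttributeError", "TypeError", "ValueError"]

-- ===== PORT A =====
-- A's inner 'for i, line in enumerate(lines): if pattern in line: …; break', threading the errors accumulator
def pvAInner (pattern : String) (lines : List String) : List (Int × String) → List String → List String
  | [], errors => errors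
  | (i, line) :: rest, errors =>
    if PySem.Str.isIn pattern line then
      errors ++ [PySem.Str.join "\n"
        (PySem.List.slice lines (some (max 0 (i - 1))) (some (min (lines.length : Int) (i + 3))))]
    else pvAInner pattern lines rest errors

def extract_compilation_errors (step : List (String × String)) : List String :=
  let observation := (PySem.Dict.mk step).getD "observation" ""
  let errors : List String := []
  let error_patterns := pvErrorPatterns
  error_patterns.foldl (fun errors pattern =>
    if PySem.Str.isIn pattern observation then
      let lines := (PySem.Str.split? observation "\n").getD []
      pvAInner pattern lines (PySem.List.enumerate lines) errors
    else errors) errors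

-- ===== PORT B =====
-- B's single enumerated pass: record each pattern's first matching line index
def pvBuildIdx (lines : List String) : PySem.Dict String Int :=
  (PySem.List.enumerate lines).foldl (fun d il =>
    pvErrorPatterns.foldl (fun d pattern =>
      if (d.get? pattern).isNone && PySem.Str.isIn pattern il.2 then d.insert pattern il.1 else d) d)
    (PySem.Dict.mk [])

def extract_compilation_errors_alt (step : List (String × String)) : List String :=
  let observation := (PySem.Dict.mk step).getD "observation" ""
  let lines := (PySem.Str.split? observation "\n").getD []
  let first_idx := pvBuildIdx lines
  pvErrorPatterns.foldl (fun errors pattern =>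
    match first_idx.get? pattern with
    | some i => errors ++ [PySem.Str.join "\n"
        (PySem.List.slice lines (some (max 0 (i - 1))) (some (min (lines.length : Int) (i + 3))))]
    | none => errors) []

-- ===== PRECONDITION & SPEC =====
def Spec_extract_compilation_errors (step : List (String × String)) (out : List String) : Prop := out = extract_compilation_errors_alt step
instance (step : List (String × String)) (out : List String) : Decidable (Spec_extract_compilation_errors step out) := by unfold Spec_extract_compilation_errors; infer_instance

-- ===== CLAIM (what is proved, stated in full; the proofs are below) =====
def Claim_equal_extract_compilation_errors : Prop := ∀ (step : List (String × String)), Dom_extract_compilation_errors step → Spec_extract_compilation_errors step (extract_compilation_errors step)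

-- ===== LEMMAS AND PROOFS =====

-- first matching line index, in A's scan order
def pvScanIdx (pattern : String) : List (Int × String) → Option Int
  | [] => none
  | (i, line) :: rest => if PySem.Str.isIn pattern line then some i else pvScanIdx pattern rest

theorem pv_inner_preserve (il : Int × String) (ps : List String) (p : String) (hp : p ∉ ps)
    (d : PySem.Dict String Int) :
    (ps.foldl (fun d pattern => if (d.get? pattern).isNone && PySem.Str.isIn pattern il.2 then d.insert pattern il.1 else d) d).get? p = d.get? p := by
  induction ps generalizing d with
  | nil => rfl
  | cons q ps ih =>
    simp only [List.foldl_cons]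
    rw [ih (fun h => hp (List.mem_cons_of_mem _ h))]
    split
    · exact PySem.Dict.get?_insert_of_ne d il.1 (fun h => hp (h ▸ List.mem_cons_self))
    · rfl

theorem pv_inner_get (il : Int × String) (ps : List String) (p : String) (hnd : ps.Nodup)
    (hp : p ∈ ps) (d : PySem.Dict String Int) :
    (ps.foldl (fun d pattern => if (d.get? pattern).isNone && PySem.Str.isIn pattern il.2 then d.insert pattern il.1 else d) d).get? p
      = if (d.get? p).isNone && PySem.Str.isIn p il.2 then some il.1 else d.get? p := by
  induction ps generalizing d with
  | nil => cases hp
  | cons q ps ih =>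
    simp only [List.foldl_cons]
    rcases List.mem_cons.mp hp with h | h
    · subst h
      have hnp : p ∉ ps := (List.nodup_cons.mp hnd).1
      rw [pv_inner_preserve il ps p hnp]
      split
      · exact PySem.Dict.get?_insert_self d p il.1
      · rfl
    · have hqp : q ≠ p := fun e => (List.nodup_cons.mp hnd).1 (e ▸ h)
      have hstep : (if (d.get? q).isNone && PySem.Str.isIn q il.2 then d.insert q il.1 else d).get? p = d.get? p := by
        split
        · exact PySem.Dict.get?_insert_of_ne d il.1 (Ne.symm hqp)
        · rfl
      rw [ih (List.nodup_cons.mp hnd).2 h, hstep]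

theorem pv_outer (p : String) (hp : p ∈ pvErrorPatterns) :
    ∀ (pairs : List (Int × String)) (d : PySem.Dict String Int),
    (pairs.foldl (fun d il =>
        pvErrorPatterns.foldl (fun d pattern => if (d.get? pattern).isNone && PySem.Str.isIn pattern il.2 then d.insert pattern il.1 else d) d) d).get? p
      = match d.get? p with | some v => some v | none => pvScanIdx p pairs := by
  intro pairs
  induction pairs with
  | nil => intro d; cases h : d.get? p <;> simp [pvScanIdx, h]
  | cons x rest ih =>
    intro d
    simp only [List.foldl_cons]
    rw [ih, pv_inner_get x pvErrorPatterns p (by decide) hp d]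
    rcases x with ⟨i, line⟩
    cases h : d.get? p with
    | some v => simp
    | none =>
      simp only [Option.isNone_none, Bool.true_and, pvScanIdx, PySem.Str.isIn]
      by_cases hl : PySem.Chars.isIn p.toList line.toList = true
      · simp [hl]
      · simp [hl]

theorem pv_aInner_emit (pattern : String) (lines : List String) (pairs : List (Int × String))
    (errors : List String) :
    pvAInner pattern lines pairs errors =
      errors ++ (match pvScanIdx pattern pairs with
        | some i => [PySem.Str.join "\n"
            (PySem.List.slice lines (some (max 0 (i - 1))) (some (min (lines.length : Int) (i + 3))))]
        | none => []) := by
  induction pairs generalizing errors with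
  | nil => simp [pvAInner, pvScanIdx]
  | cons x rest ih =>
    rcases x with ⟨i, line⟩
    by_cases hl : PySem.Chars.isIn pattern.toList line.toList = true
    · simp [pvAInner, pvScanIdx, PySem.Str.isIn, hl]
    · simp only [pvAInner, pvScanIdx, PySem.Str.isIn, if_neg hl, ih]

theorem pv_scan_mem (p : String) (pairs : List (Int × String)) (i : Int)
    (h : pvScanIdx p pairs = some i) :
    ∃ line, (i, line) ∈ pairs ∧ PySem.Str.isIn p line = true := by
  induction pairs with
  | nil => simp [pvScanIdx] at h
  | cons x rest ih =>
    rcases x with ⟨j, line⟩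
    by_cases hl : PySem.Chars.isIn p.toList line.toList = true
    · simp [pvScanIdx, PySem.Str.isIn, hl] at h
      exact ⟨line, by simp [h], by simpa [PySem.Str.isIn] using hl⟩
    · simp only [pvScanIdx, PySem.Str.isIn, if_neg hl] at h
      obtain ⟨l, hm, hi⟩ := ih h
      exact ⟨l, List.mem_cons_of_mem _ hm, hi⟩

theorem pv_enumerate_mem {α : Type} (xs : List α) (start : Int) (i : Int) (x : α)
    (h : (i, x) ∈ PySem.List.enumerate xs start) : x ∈ xs := by
  induction xs generalizing start with
  | nil => simp [PySem.List.enumerate] at h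
  | cons y ys ih =>
    simp only [PySem.List.enumerate, List.mem_cons] at h
    rcases h with h | h
    · simp [(Prod.mk.injEq _ _ _ _ ▸ h).2]
    · exact List.mem_cons_of_mem _ (ih (start + 1) h)


theorem pv_splitOn_go_infix (sep s : List Char) :
    ∀ (fuel : Nat) (l cur : List Char) (acc : List (List Char)),
      (∀ c ∈ acc, c <:+: s) → (cur.reverse ++ l) <:+: s →
      ∀ c ∈ PySem.Chars.splitOn.go sep fuel l cur acc, c <:+: s := by
  intro fuel
  induction fuel with
  | zero =>
    intro l cur acc hacc hcl c hc
    rw [PySem.Chars.splitOn.go.eq_def] at hc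
    simp at hc
    rcases hc with h | h
    · exact hacc _ h
    · exact h ▸ hcl
  | succ fuel ih =>
    intro l cur acc hacc hcl c hc
    rw [PySem.Chars.splitOn.go.eq_def] at hc
    cases l with
    | nil =>
      simp at hc
      rcases hc with h | h
      · exact hacc _ h
      · subst h; simpa using hcl
    | cons a rest =>
      simp only [] at hc
      split at hc
      · refine ih _ [] (cur.reverse :: acc) ?_ ?_ c hc
        · intro d hd
          rcases List.mem_cons.mp hd with h | h
          · subst h
            exact List.IsInfix.trans (List.prefix_append cur.reverse (a :: rest)).isInfix hcl
          · exact hacc _ h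
        · simp only [List.reverse_nil, List.nil_append]
          exact List.IsInfix.trans (List.drop_suffix sep.length (a :: rest)).isInfix
            (List.IsInfix.trans (List.suffix_append cur.reverse (a :: rest)).isInfix hcl)
      · exact ih _ (a :: cur) acc hacc (by simpa using hcl) c hc

theorem pv_mem_splitOn_infix (s sep : List Char) {c : List Char}
    (h : c ∈ PySem.Chars.splitOn s sep) : c <:+: s := by
  have := pv_splitOn_go_infix sep s (s.length + 1) s [] [] (by simp) (by simp)
  exact this c h

theorem pv_mem_lines_infix (obs line : String)
    (h : line ∈ (PySem.Str.split? obs "\n").getD []) : line.toList <:+: obs.toList := by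
  have hmap := PySem.Str.split?_map obs "\n"
  cases hs : PySem.Str.split? obs "\n" with
  | none =>
    rw [hs] at hmap
    simp [PySem.Chars.split?] at hmap
  | some L =>
    rw [hs] at hmap
    simp only [Option.map_some, PySem.Chars.split?] at hmap
    rw [if_neg (by decide)] at hmap
    have : line.toList ∈ PySem.Chars.splitOn obs.toList "\n".toList := by
      rw [← Option.some_inj.mp hmap]
      exact List.mem_map_of_mem (by simpa [hs] using h)
    exact pv_mem_splitOn_infix _ _ this

theorem pv_scan_isIn (obs : String) (p : String) (i : Int)
    (h : pvScanIdx p (PySem.List.enumerate ((PySem.Str.split? obs "\n").getD [])) = some i) :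
    PySem.Str.isIn p obs = true := by
  obtain ⟨line, hm, hi⟩ := pv_scan_mem p _ i h
  have hline := pv_mem_lines_infix obs line (pv_enumerate_mem _ 0 i line hm)
  rw [PySem.Str.isIn_iff_infix] at hi ⊢
  exact hi.trans hline



theorem pv_buildIdx_get (lines : List String) (p : String) (hp : p ∈ pvErrorPatterns) :
    (pvBuildIdx lines).get? p = pvScanIdx p (PySem.List.enumerate lines) := by
  unfold pvBuildIdx
  rw [pv_outer p hp]
  have : (PySem.Dict.mk ([] : List (String × Int))).get? p = none := rfl
  rw [this]

-- ===== VERDICT (by name: the statement is the Claim_ definition above) =====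
theorem extract_compilation_errors_spec : Claim_equal_extract_compilation_errors := by
  intro step _
  unfold Spec_extract_compilation_errors extract_compilation_errors extract_compilation_errors_alt
  simp only []
  apply PySem.List.foldl_congr_mem
  intro acc p hp
  rw [pv_buildIdx_get _ p hp]
  cases hscan : pvScanIdx p (PySem.List.enumerate ((PySem.Str.split? ((PySem.Dict.mk step).getD "observation" "") "\n").getD [])) with
  | none =>
    by_cases hin : PySem.Chars.isIn p.toList ((PySem.Dict.mk step).getD "observation" "").toList = true
    · simp [PySem.Str.isIn, hin, pv_aInner_emit, hscan]
    · simp [PySem.Str.isIn, hin]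
  | some i =>
    have hin := pv_scan_isIn _ p i hscan
    simp only [PySem.Str.isIn] at hin
    simp [PySem.Str.isIn, hin, pv_aInner_emit, hscan]
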